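-- pv_equiv track=rewrite | github.com/SugeilyCruz/Compiladores- | compiladorconFOR.py | puntoComa
-- ===== SOURCE A (Python) =====
-- def quitaComentarios(cad):
--     estado ="Z"
--     cad2 =""
--     for c in cad:
--         if (estado=="Z"):
--             if (c=="/"):
--                 estado = "A"
--             else:
--                 cad2 = cad2 + c
--         elif (estado=="A"):
--             if (c=="*"):
--                 estado="B"
--             else:
--                 estado = "Z"
--                 cad2=cad2+"/"+c
--         elif (estado=="B"):
--             if (c=="*"):
--                 estado = "C"
--         elif(estado=="C"):
--             if (c=="/"):
--                 estado="Z"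
--             else:
--                 estado="B"
--     return cad2
--
-- def esSeparador(caracter):
--     return caracter in " \n\t"
--
-- def esSimboloEsp(caracter):
--     return caracter in "+-*;,.:!=%&/()[]{}<><=>=:="
--
-- def tokeniza(cad):
--     tokens = []
--     dentro = False
--     token = ""
--     for c in cad:
--         if dentro: #esta dentro del token
--             if esSeparador(c):
--                 tokens.append(token)
--                 token = ""
--                 dentro = False
--             elif esSimboloEsp(c):
--                 tokens.append(token)
--                 tokens.append(c)
--                 token = ""
--                 dentro = False
--             else:
--                 token = token + c
--         else: #esta fuera del token
--             if esSimboloEsp(c):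
--                 tokens.append(c)
--             elif esSeparador(c):
--                 a=0
--             else:
--                 dentro = True
--                 token = c
--     if token != '':
--        tokens.append(token)
--     return tokens
--
-- def puntoComa(archivo):
--     z=True
--     d=0
--     l=[]
--     for ren in archivo:
--         datos = quitaComentarios(ren)#1
--         da=tokeniza(datos)
--         d+=1
--         if (da[-1]!=";") and (da[-1]!="{") and (da[-1]!="}"):
--             z=False
--             l.append(d)
--     return z,l
-- ===== SOURCE B (Python) =====
-- def esSeparador(caracter):
--     return caracter in " \n\t"
--
-- def esSimboloEsp(caracter):
--     return caracter in "+-*;,.:!=%&/()[]{}<><=>=:="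
--
-- def _feed(c, token, last):
--     # one tokenizer step on an already comment-free character
--     if esSeparador(c):
--         if token:
--             last = token
--             token = ""
--     elif esSimboloEsp(c):
--         token = ""
--         last = c
--     else:
--         token = token + c
--     return token, last
--
-- def _ultimoToken(linea):
--     # fused comment-stripper + tokenizer; keeps only the last token seen
--     estado = "Z"
--     token = ""
--     last = None
--     for c in linea:
--         if estado == "Z":
--             if c == "/":
--                 estado = "A"
--             else:
--                 token, last = _feed(c, token, last)
--         elif estado == "A":
--             if c == "*":
--                 estado = "B"
--             else:
--                 estado = "Z"
--                 token, last = _feed("/", token, last)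
--                 token, last = _feed(c, token, last)
--         elif estado == "B":
--             if c == "*":
--                 estado = "C"
--         else:  # estado == "C"
--             if c == "/":
--                 estado = "Z"
--             else:
--                 estado = "B"
--     if token:
--         last = token
--     return last
--
-- def puntoComa(archivo):
--     z = True
--     l = []
--     for d, ren in enumerate(archivo, 1):
--         last = _ultimoToken(ren)
--         if last not in (";", "{", "}"):
--             z = False
--             l.append(d)
--     return z, l
-- ===== Notes on version B (the rewrite author's own statement) =====
-- stated objective: simpler
-- what changed: Fuses A's two passes (quitaComentarios building a stripped string, then tokeniza building a full token list per line) into one per-line streaming state machine that tracks comment state and only the current token buffer plus the last emitted token, so neither the stripped string nor the token list is materialized.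
-- crash fix: On files containing a line that, after /*...*/ comment removal, holds no visible (non-whitespace) character, A raises IndexError on da[-1]; B returns normally, flagging that line's number and z=False. — e.g. on puntoComa(["x;", ""]): A raises IndexError, B returns (false, [2])
import Mathlib
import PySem

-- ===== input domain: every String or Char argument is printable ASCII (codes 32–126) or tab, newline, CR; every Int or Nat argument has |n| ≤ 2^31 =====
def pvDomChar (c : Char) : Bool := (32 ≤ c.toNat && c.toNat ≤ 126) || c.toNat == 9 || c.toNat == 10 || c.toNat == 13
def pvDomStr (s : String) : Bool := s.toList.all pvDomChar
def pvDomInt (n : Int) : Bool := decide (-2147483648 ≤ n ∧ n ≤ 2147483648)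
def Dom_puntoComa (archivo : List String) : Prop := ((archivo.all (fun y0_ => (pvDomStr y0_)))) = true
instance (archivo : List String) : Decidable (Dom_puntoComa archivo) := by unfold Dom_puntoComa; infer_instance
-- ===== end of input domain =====

-- B fuses A's two passes (comment stripping, then tokenizing the stripped line) into one
-- per-line streaming state machine keeping only the current token buffer and the last token.

-- ===== PORT A =====
def esSeparadorL (caracter : Char) : Bool := (" \n\t".toList).contains caracter

def esSimboloEspL (caracter : Char) : Bool := ("+-*;,.:!=%&/()[]{}<><=>=:=".toList).contains caracter

-- one iteration of quitaComentarios' for-loop (state: estado, cad2)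
def quitaStep (st : String × List Char) (c : Char) : String × List Char :=
  match st with
  | (estado, cad2) =>
    if estado = "Z" then
      if c = '/' then ("A", cad2) else (estado, cad2 ++ [c])
    else if estado = "A" then
      if c = '*' then ("B", cad2) else ("Z", cad2 ++ ['/', c])
    else if estado = "B" then
      if c = '*' then ("C", cad2) else (estado, cad2)
    else
      if c = '/' then ("Z", cad2) else ("B", cad2)

def quitaComentarios (cad : List Char) : List Char :=
  (cad.foldl quitaStep ("Z", [])).2

-- one iteration of tokeniza's for-loop (state: tokens, dentro, token)
def tokenizaStep (st : List (List Char) × Bool × List Char) (c : Char) :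
    List (List Char) × Bool × List Char :=
  match st with
  | (tokens, dentro, token) =>
    if dentro then
      if esSeparadorL c then (tokens ++ [token], false, [])
      else if esSimboloEspL c then (tokens ++ [token, [c]], false, [])
      else (tokens, dentro, token ++ [c])
    else
      if esSimboloEspL c then (tokens ++ [[c]], dentro, token)
      else if esSeparadorL c then (tokens, dentro, token)
      else (tokens, true, [c])

def tokeniza (cad : List Char) : List (List Char) :=
  let r := cad.foldl tokenizaStep ([], false, [])
  if r.2.2 ≠ [] then r.1 ++ [r.2.2] else r.1

-- one iteration of puntoComa's for-loop (state: z, d, l)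
def puntoComaStep (st : Bool × Int × List Int) (ren : String) : Bool × Int × List Int :=
  match st with
  | (z, d, l) =>
    let datos := quitaComentarios ren.toList
    let da := tokeniza datos
    let d := d + 1
    -- da[-1] raises IndexError when da = []; Pre_ excludes that, the default [] is never used there
    let last := (PySem.List.pyGet? da (-1)).getD []
    if last ≠ [';'] && last ≠ ['{'] && last ≠ ['}'] then (false, d, l ++ [d]) else (z, d, l)

def puntoComa (archivo : List String) : Bool × List Int :=
  let r := archivo.foldl puntoComaStep (true, 0, [])
  (r.1, r.2.2)

-- ===== PORT B =====
-- one tokenizer step on an already comment-free character (Source B's _feed)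
def feedTok (c : Char) (token : List Char) (last : Option (List Char)) :
    List Char × Option (List Char) :=
  if esSeparadorL c then
    if token ≠ [] then ([], some token) else (token, last)
  else if esSimboloEspL c then ([], some [c])
  else (token ++ [c], last)

-- one iteration of _ultimoToken's loop (state: estado, token, last)
def ultimoStep (st : String × List Char × Option (List Char)) (c : Char) :
    String × List Char × Option (List Char) :=
  match st with
  | (estado, token, last) =>
    if estado = "Z" then
      if c = '/' then ("A", token, last)
      else
        let r := feedTok c token last
        ("Z", r.1, r.2)
    else if estado = "A" then
      if c = '*' then ("B", token, last)
      else
        let r := feedTok '/' token last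
        let r2 := feedTok c r.1 r.2
        ("Z", r2.1, r2.2)
    else if estado = "B" then
      if c = '*' then ("C", token, last) else (estado, token, last)
    else
      if c = '/' then ("Z", token, last) else ("B", token, last)

def ultimoToken (linea : List Char) : Option (List Char) :=
  let r := linea.foldl ultimoStep ("Z", [], none)
  if r.2.1 ≠ [] then some r.2.1 else r.2.2

def puntoComaAltStep (st : Bool × Int × List Int) (ren : String) : Bool × Int × List Int :=
  match st with
  | (z, d, l) =>
    let d := d + 1
    match ultimoToken ren.toList with
    | some t => if t = [';'] ∨ t = ['{'] ∨ t = ['}'] then (z, d, l) else (false, d, l ++ [d])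
    | none => (false, d, l ++ [d])

def puntoComa_alt (archivo : List String) : Bool × List Int :=
  let r := archivo.foldl puntoComaAltStep (true, 0, [])
  (r.1, r.2.2)

-- ===== PRECONDITION & SPEC =====
-- true iff the line, with /*…*/ comments removed, contains a non-whitespace character
def lineHasToken (line : List Char) : Bool :=
  (line.foldl (fun (st : Nat × Bool) c =>
    match st with
    | (s, found) =>
      if s = 0 then
        if c = '/' then (1, found) else (0, found || !(c = ' ' || c = '\n' || c = '\t'))
      else if s = 1 then
        if c = '*' then (2, found) else (0, true)
      else if s = 2 then
        if c = '*' then (3, found) else (2, found)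
      else
        if c = '/' then (0, found) else (2, found)) (0, false)).2

-- Pre_ excludes exactly the inputs where Python A raises IndexError: a line holding no visible
-- character outside comments tokenizes to the empty list, and da[-1] raises.
def Pre_puntoComa (archivo : List String) : Prop :=
  ∀ s ∈ archivo, lineHasToken s.toList = true
instance (archivo : List String) : Decidable (Pre_puntoComa archivo) := by
  unfold Pre_puntoComa; infer_instance

def pvWitness_puntoComa : List String := ["int x = 1;", "if (x) {", "}"]

-- A raises IndexError on any file with a line that is blank or all comments/whitespace;
-- B returns normally there, flagging that line number with z = False.
def Raises_puntoComa (archivo : List String) : Prop :=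
  ∃ s ∈ archivo, lineHasToken s.toList = false
instance (archivo : List String) : Decidable (Raises_puntoComa archivo) := by
  unfold Raises_puntoComa; infer_instance

def pvRaiseWitness_puntoComa : List String := ["x;", ""]
def pvRaiseWitnessOut_puntoComa : Bool × List Int := (false, [2])

def Spec_puntoComa (archivo : List String) (out : Bool × List Int) : Prop := out = puntoComa_alt archivo
instance (archivo : List String) (out : Bool × List Int) : Decidable (Spec_puntoComa archivo out) := by unfold Spec_puntoComa; infer_instance

-- ===== CLAIM (what is proved, stated in full; the proofs are below) =====
def Claim_equal_puntoComa : Prop := ∀ (archivo : List String), Dom_puntoComa archivo → Pre_puntoComa archivo → Spec_puntoComa archivo (puntoComa archivo)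

def Claim_raises_puntoComa : Prop := (∀ (archivo : List String), Dom_puntoComa archivo → Raises_puntoComa archivo → ¬ Pre_puntoComa archivo) ∧ (Dom_puntoComa (pvRaiseWitness_puntoComa) ∧ Raises_puntoComa (pvRaiseWitness_puntoComa) ∧ puntoComa_alt (pvRaiseWitness_puntoComa) = pvRaiseWitnessOut_puntoComa)

-- ===== LEMMAS AND PROOFS =====

-- per-char emission of quitaComentarios' machine: next state and emitted characters
def cEmit (estado : String) (c : Char) : String × List Char :=
  if estado = "Z" then (if c = '/' then ("A", []) else ("Z", [c]))
  else if estado = "A" then (if c = '*' then ("B", []) else ("Z", ['/', c]))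
  else if estado = "B" then (if c = '*' then ("C", []) else ("B", []))
  else (if c = '/' then ("Z", []) else ("B", []))

theorem quitaStep_eq (estado : String) (cad2 : List Char) (c : Char)
    (h : estado = "Z" ∨ estado = "A" ∨ estado = "B" ∨ estado = "C") :
    quitaStep (estado, cad2) c = ((cEmit estado c).1, cad2 ++ (cEmit estado c).2) := by
  rcases h with h | h | h | h <;> subst h <;> simp [quitaStep, cEmit] <;> split_ifs <;> simp

theorem quita_acc (cs : List Char) (e : String) (acc : List Char)
    (h : e = "Z" ∨ e = "A" ∨ e = "B" ∨ e = "C") :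
    cs.foldl quitaStep (e, acc) =
      ((cs.foldl quitaStep (e, [])).1, acc ++ (cs.foldl quitaStep (e, [])).2) := by
  induction cs generalizing e acc with
  | nil => simp
  | cons c cs ih =>
    have hstep := quitaStep_eq e acc c h
    have hstep0 := quitaStep_eq e [] c h
    have hst : (cEmit e c).1 = "Z" ∨ (cEmit e c).1 = "A" ∨ (cEmit e c).1 = "B" ∨ (cEmit e c).1 = "C" := by
      rcases h with h | h | h | h <;> subst h <;> simp [cEmit] <;> split_ifs <;> simp
    simp only [List.foldl_cons, hstep, hstep0, List.nil_append]
    rw [ih _ (acc ++ (cEmit e c).2) hst, ih _ ((cEmit e c).2) hst]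
    simp

theorem sep_not_simbolo (c : Char) (h : esSeparadorL c = true) : esSimboloEspL c = false := by
  simp [esSeparadorL] at h
  rcases h with h | h | h <;> subst h <;> decide

-- Source B's _feed performs exactly one tokeniza step, tracking only the last token
theorem feed_eq (c : Char) (tokens : List (List Char)) (token : List Char)
    (last : Option (List Char))
    (hl : last = tokens.getLast?) :
    feedTok c token last =
      ((tokenizaStep (tokens, !token.isEmpty, token) c).2.2,
       (tokenizaStep (tokens, !token.isEmpty, token) c).1.getLast?) ∧
    (tokenizaStep (tokens, !token.isEmpty, token) c).2.1 =
      !(tokenizaStep (tokens, !token.isEmpty, token) c).2.2.isEmpty := by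
  subst hl
  by_cases hsep : esSeparadorL c
  · have hns := sep_not_simbolo c hsep
    by_cases ht : token = [] <;>
      simp [feedTok, tokenizaStep, hsep, hns, ht, List.isEmpty_iff, List.getLast?_concat]
  · by_cases hsym : esSimboloEspL c
    · by_cases ht : token = []
      · simp [feedTok, tokenizaStep, hsep, hsym, ht, List.getLast?_concat]
      · simp [feedTok, tokenizaStep, hsep, hsym, List.isEmpty_iff, ht]
    · by_cases ht : token = []
      · simp [feedTok, tokenizaStep, hsep, hsym, ht]
      · refine ⟨by simp [feedTok, tokenizaStep, hsep, hsym, List.isEmpty_iff, ht], ?_⟩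
        simp only [tokenizaStep, hsep, hsym]
        cases token with
        | nil => exact absurd rfl ht
        | cons x xs => simp

-- one fused step simulates the emitted characters being run through the tokenizer
theorem ultimoStep_eq (estado : String) (tokens : List (List Char)) (token : List Char)
    (last : Option (List Char)) (c : Char)
    (hst : estado = "Z" ∨ estado = "A" ∨ estado = "B" ∨ estado = "C")
    (hl : last = tokens.getLast?) :
    ultimoStep (estado, token, last) c =
      ((cEmit estado c).1,
       (List.foldl tokenizaStep (tokens, !token.isEmpty, token) (cEmit estado c).2).2.2,
       (List.foldl tokenizaStep (tokens, !token.isEmpty, token) (cEmit estado c).2).1.getLast?) ∧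
    (List.foldl tokenizaStep (tokens, !token.isEmpty, token) (cEmit estado c).2).2.1 =
      !(List.foldl tokenizaStep (tokens, !token.isEmpty, token) (cEmit estado c).2).2.2.isEmpty := by
  rcases hst with h | h | h | h <;> subst h
  · by_cases hc : c = '/'
    · subst hc; subst hl; simp [ultimoStep, cEmit]
    · obtain ⟨h1, h2⟩ := feed_eq c tokens token last hl
      simp only [ultimoStep, cEmit, if_pos rfl, if_neg hc, List.foldl_cons, List.foldl_nil, h1]
      exact ⟨rfl, h2⟩
  · by_cases hc : c = '*'
    · subst hc; subst hl; simp [ultimoStep, cEmit]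
    · obtain ⟨h1, h2⟩ := feed_eq '/' tokens token last hl
      set s1 := tokenizaStep (tokens, !token.isEmpty, token) '/' with hs1
      have hmid : s1 = (s1.1, !s1.2.2.isEmpty, s1.2.2) := by rw [← h2]
      obtain ⟨h3, h4⟩ := feed_eq c s1.1 s1.2.2 s1.1.getLast? rfl
      rw [← hmid] at h3 h4
      simp only [ultimoStep, cEmit, if_neg (by decide : ¬ ("A" : String) = "Z"), if_pos rfl,
        if_neg hc, List.foldl_cons, List.foldl_nil, ← hs1, h1, h3]
      exact ⟨rfl, h4⟩
  · by_cases hc : c = '*' <;> subst hl <;> simp [ultimoStep, cEmit, hc]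
  · by_cases hc : c = '/' <;> subst hl <;> simp [ultimoStep, cEmit, hc]

-- the fused machine simulates comment stripping followed by tokenizing the emitted characters
theorem fused_sim (cs : List Char) (estado : String) (tokens : List (List Char))
    (token : List Char) (last : Option (List Char))
    (hst : estado = "Z" ∨ estado = "A" ∨ estado = "B" ∨ estado = "C")
    (hl : last = tokens.getLast?) :
    (cs.foldl ultimoStep (estado, token, last)).1 = (cs.foldl quitaStep (estado, [])).1 ∧
    (cs.foldl ultimoStep (estado, token, last)).2.1 =
      (((cs.foldl quitaStep (estado, [])).2).foldl tokenizaStep (tokens, !token.isEmpty, token)).2.2 ∧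
    (cs.foldl ultimoStep (estado, token, last)).2.2 =
      (((cs.foldl quitaStep (estado, [])).2).foldl tokenizaStep (tokens, !token.isEmpty, token)).1.getLast? ∧
    (((cs.foldl quitaStep (estado, [])).2).foldl tokenizaStep (tokens, !token.isEmpty, token)).2.1 =
      !(((cs.foldl quitaStep (estado, [])).2).foldl tokenizaStep (tokens, !token.isEmpty, token)).2.2.isEmpty := by
  induction cs generalizing estado tokens token last with
  | nil => subst hl; simp
  | cons c cs ih =>
    obtain ⟨hu, hd⟩ := ultimoStep_eq estado tokens token last c hst hl
    have hst' : (cEmit estado c).1 = "Z" ∨ (cEmit estado c).1 = "A" ∨ (cEmit estado c).1 = "B" ∨ (cEmit estado c).1 = "C" := by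
      rcases hst with h | h | h | h <;> subst h <;> simp [cEmit] <;> split_ifs <;> simp
    simp only [List.foldl_cons, hu, quitaStep_eq estado [] c hst, List.nil_append]
    rw [quita_acc cs _ _ hst']
    simp only [List.foldl_append]
    set T := List.foldl tokenizaStep (tokens, !token.isEmpty, token) (cEmit estado c).2 with hT
    have hTe : T = (T.1, !T.2.2.isEmpty, T.2.2) := by rw [← hd]
    rw [hTe]
    exact ih (cEmit estado c).1 T.1 T.2.2 T.1.getLast? hst' rfl

-- per line: the fused machine's answer is the last token of the two-pass pipeline
theorem ultimoToken_eq (cs : List Char) :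
    ultimoToken cs = (tokeniza (quitaComentarios cs)).getLast? := by
  obtain ⟨-, h2, h3, -⟩ := fused_sim cs "Z" [] [] none (by simp) rfl
  unfold ultimoToken tokeniza quitaComentarios
  simp only [List.isEmpty_nil, Bool.not_true] at h2 h3
  simp only [h2, h3]
  by_cases hne : ((cs.foldl quitaStep ("Z", [])).2.foldl tokenizaStep ([], false, [])).2.2 = [] <;>
    simp [hne, List.getLast?_concat]

theorem step_eq (st : Bool × Int × List Int) (ren : String) :
    puntoComaStep st ren = puntoComaAltStep st ren := by
  obtain ⟨z, d, l⟩ := st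
  simp only [puntoComaStep, puntoComaAltStep]
  rw [PySem.List.pyGet?_neg_one, ← ultimoToken_eq]
  cases hlt : ultimoToken ren.toList with
  | none => simp
  | some t =>
    simp only [Option.getD_some]
    by_cases h1 : t = [';']
    · simp [h1]
    · by_cases h2 : t = ['{']
      · simp [h2]
      · by_cases h3 : t = ['}'] <;> simp [h1, h2, h3]

-- ===== VERDICT (by name: the statement is the Claim_ definition above) =====
theorem puntoComa_spec : Claim_equal_puntoComa := by
  intro archivo _ _
  unfold Spec_puntoComa puntoComa puntoComa_alt
  have h : puntoComaStep = puntoComaAltStep :=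
    funext fun st => funext fun ren => step_eq st ren
  rw [h]

theorem puntoComa_raises : Claim_raises_puntoComa := by
  unfold Claim_raises_puntoComa
  constructor
  · rintro archivo _ ⟨s, hs, hfalse⟩ hpre
    have := hpre s hs
    rw [hfalse] at this
    exact Bool.false_ne_true this
  · refine ⟨by decide, ⟨"", by decide, by decide⟩, by decide⟩

-- deliberate self-check: the raise witness lies in Raises_ and B's port returns the stated value there
theorem pvRaiseWitness_puntoComa_ok :
    Raises_puntoComa pvRaiseWitness_puntoComa ∧
      puntoComa_alt pvRaiseWitness_puntoComa = pvRaiseWitnessOut_puntoComa :=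
  ⟨puntoComa_raises.2.2.1, puntoComa_raises.2.2.2⟩
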